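-- pv_equiv track=rewrite | github.com/gurllacerda/JOGO-Orbito-N- | FP2425P2.py | obtem_posicoes_por_orbita
-- ===== SOURCE A (Python) =====
-- def obtem_pos_col(p):
--     """
--     Obtém a coluna de uma posição.
--
--     Parâmetros:
--         p(tuple): Posição, que é representada por um tuplo.
--
--     Retornos:
--         str: Coluna da posição.
--     """
--     return p[0]
--
-- def obtem_pos_lin(p):
--     """
--     Obtém a linha de uma posição.
--
--     Parâmetros:
--         p (tuple): Posição, que é representada por um tuplo.
--
--     Retornos:
--         int: Linha da posição.
--     """
--     return p[1]
--
-- def obtem_lista_coluna(n):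
--     """
--     Obtém a lista do alfabeto das colunas, ao se basear pela órbita.
--
--     Parâmetros:
--         n(int): Número de órbitas.
--
--     Retornos:
--         tuple: Tuplo com as colunas válidas para o tabuleiro de tamanho n.
--     """
--     maxColunas = ("a","b","c","d","e","f","g","h","i","j")
--     # numColunas,numLinhas = n*2
--     colunas = ()
--     for i in range(len(maxColunas)):
--         if i < n*2:
--             colunas += (maxColunas[i],)
--     return colunas
--
-- def obtem_orbita(pos, n):
--     """
--     Calcula a órbita de uma posição em um tabuleiro de dimensão n x n.
--
--     Parâmetros:
--         pos(tuple): Posição representada por um tuplo.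
--         n(int): Dimensão do tabuleiro.
--
--     Retornos:
--         int: A órbita da posição, baseada na menor distância até as bordas.
--     """
--
--     #n aqui é a doimensão
--     linha = obtem_pos_lin(pos)
--     coluna_letra = obtem_pos_col(pos)
--
--     coluna = ord(coluna_letra) - ord('a')
--
--     # Calcula a órbita com base na menor distância até as bordas
--     return min(linha - 1, n - linha, coluna, n - 1 - coluna)
--
-- def obtem_posicoes_por_orbita(dimensaoTab, orbita):
--     """
--     Obtém as posições pertencentes a uma órbita específica no tabuleiro.
--
--     Parâmetros:
--         dimensaoTab (int): Dimensão do tabuleiro.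
--         orbita (int): Número da órbita para obter as posições.
--
--     Retornos:
--         tuple: Posições pertencentes à órbita especificada.
--     """
--     posicoesOrbita = ()
--     colunas = obtem_lista_coluna(dimensaoTab//2)
--
--     for linha in range(1, dimensaoTab+1):
--         for colunaLetra in colunas:
--             posicao = (colunaLetra, linha)
--
--
--             if obtem_orbita(posicao, dimensaoTab) == orbita:
--                 posicoesOrbita += (posicao,)
--     return posicoesOrbita
-- ===== SOURCE B (Python) =====
-- def obtem_posicoes_por_orbita(dimensaoTab, orbita):
--     """Directly generates only the ring's cells per row instead of scanning every column of every row."""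
--     n = dimensaoTab
--     numCols = min(10, 2 * (n // 2))  # the board never has more than 10 columns
--     posicoes = []
--     for linha in range(1, n + 1):
--         orbitaLinha = min(linha - 1, n - linha)
--         if orbitaLinha < orbita:
--             continue
--         if orbitaLinha == orbita:
--             # boundary row of the ring: a full span of columns
--             lo = max(orbita, 0)
--             hi = min(n - 1 - orbita, numCols - 1)
--             for c in range(lo, hi + 1):
--                 posicoes.append((chr(97 + c), linha))
--         else:
--             # interior row: only the two side columns of the ring
--             for c in (orbita, n - 1 - orbita):
--                 if 0 <= c < numCols:
--                     posicoes.append((chr(97 + c), linha))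
--     return tuple(posicoes)
-- ===== Notes on version B (the rewrite author's own statement) =====
-- stated objective: faster
-- what changed: Instead of testing every column of every row against the orbit formula (with O(len) tuple concatenation per hit), B computes each row's distance to the border once and directly emits only that row's ring cells: the full column span on the two boundary rows and just the two side columns on interior rows, accumulated in a list.
import Mathlib
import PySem

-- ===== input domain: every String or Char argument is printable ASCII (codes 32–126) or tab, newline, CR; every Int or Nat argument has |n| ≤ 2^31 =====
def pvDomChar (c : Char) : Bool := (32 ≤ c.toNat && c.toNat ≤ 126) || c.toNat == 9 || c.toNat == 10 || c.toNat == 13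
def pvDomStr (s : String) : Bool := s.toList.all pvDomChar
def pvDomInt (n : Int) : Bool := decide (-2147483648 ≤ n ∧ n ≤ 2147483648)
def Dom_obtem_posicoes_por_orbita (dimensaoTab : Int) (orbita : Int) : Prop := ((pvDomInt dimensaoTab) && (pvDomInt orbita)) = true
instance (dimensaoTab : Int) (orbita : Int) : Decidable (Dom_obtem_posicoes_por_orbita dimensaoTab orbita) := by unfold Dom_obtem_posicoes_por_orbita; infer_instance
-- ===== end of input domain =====

-- B replaces A's per-row scan of all columns (with quadratic tuple concatenation) by direct
-- generation of only the ring's cells in each row: objective 'faster'.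


-- ===== PORT A =====
def obtem_pos_col (p : String × Int) : String := p.1

def obtem_pos_lin (p : String × Int) : Int := p.2

-- the local tuple maxColunas of obtem_lista_coluna, hoisted to a definition
def pvMaxColunas : List String := ["a", "b", "c", "d", "e", "f", "g", "h", "i", "j"]

-- maxColunas[i] : the index i is always in range here, so pyGetD's default is unreachable
def obtem_lista_coluna (n : Int) : List String :=
  (PySem.List.pyRange 0 (pvMaxColunas.length : Int)).foldl
    (fun colunas i =>
      if i < n * 2 then colunas ++ [PySem.List.pyGetD pvMaxColunas i ""] else colunas) []

-- ord(s) for the 1-character strings this program feeds it; ord raises on other strings,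
-- which never occur here (the fallback 0 is unreachable)
def pvOrd (s : String) : Int :=
  match s.toList with
  | [c] => (c.toNat : Int)
  | _ => 0

def obtem_orbita (pos : String × Int) (n : Int) : Int :=
  let linha := obtem_pos_lin pos
  let coluna := pvOrd (obtem_pos_col pos) - 97
  min (min (min (linha - 1) (n - linha)) coluna) (n - 1 - coluna)

def obtem_posicoes_por_orbita (dimensaoTab : Int) (orbita : Int) : List (String × Int) :=
  let colunas := obtem_lista_coluna (PySem.Int.floordiv dimensaoTab 2)
  (PySem.List.pyRange 1 (dimensaoTab + 1)).foldl
    (fun acc linha =>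
      colunas.foldl
        (fun acc2 cl =>
          if obtem_orbita (cl, linha) dimensaoTab = orbita then acc2 ++ [(cl, linha)] else acc2)
        acc) []

-- ===== PORT B =====
-- chr(97 + c): only called with 0 ≤ c ≤ 9 by B, where Char.ofNat is exact
def pvLetter (c : Int) : String := String.ofList [Char.ofNat (97 + c).toNat]

def pvRowAlt (n orbita numCols linha : Int) : List (String × Int) :=
  let orbitaLinha := min (linha - 1) (n - linha)
  if orbitaLinha < orbita then []
  else if orbitaLinha = orbita then
    -- boundary row of the ring: a full span of columns
    (PySem.List.pyRange (max orbita 0) (min (n - 1 - orbita) (numCols - 1) + 1)).foldl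
      (fun acc c => acc ++ [(pvLetter c, linha)]) []
  else
    -- interior row: only the two side columns of the ring
    ([orbita, n - 1 - orbita] : List Int).foldl
      (fun acc c => if 0 ≤ c ∧ c < numCols then acc ++ [(pvLetter c, linha)] else acc) []

def obtem_posicoes_por_orbita_alt (dimensaoTab : Int) (orbita : Int) : List (String × Int) :=
  let numCols := min 10 (2 * PySem.Int.floordiv dimensaoTab 2)
  (PySem.List.pyRange 1 (dimensaoTab + 1)).foldl
    (fun acc linha => acc ++ pvRowAlt dimensaoTab orbita numCols linha) []

-- ===== PRECONDITION & SPEC =====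
def Spec_obtem_posicoes_por_orbita (dimensaoTab : Int) (orbita : Int) (out : List (String × Int)) : Prop := out = obtem_posicoes_por_orbita_alt dimensaoTab orbita
instance (dimensaoTab : Int) (orbita : Int) (out : List (String × Int)) : Decidable (Spec_obtem_posicoes_por_orbita dimensaoTab orbita out) := by unfold Spec_obtem_posicoes_por_orbita; infer_instance

-- ===== CLAIM (what is proved, stated in full; the proofs are below) =====
def Claim_equal_obtem_posicoes_por_orbita : Prop := ∀ (dimensaoTab : Int) (orbita : Int), Dom_obtem_posicoes_por_orbita dimensaoTab orbita → Spec_obtem_posicoes_por_orbita dimensaoTab orbita (obtem_posicoes_por_orbita dimensaoTab orbita)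

-- ===== LEMMAS AND PROOFS =====

-- instance-bridge to PySem.List.foldl_append_if for an `if` over a decidable Prop
lemma foldl_append_ite {α β : Type} (p : α → Prop) [DecidablePred p] (f : α → β)
    (l : List α) (acc : List β) :
    l.foldl (fun acc x => if p x then acc ++ [f x] else acc) acc
      = acc ++ (l.filter (fun x => decide (p x))).map f := by
  have h : (fun (acc : List β) x => if p x then acc ++ [f x] else acc)
      = fun acc x => if (fun y => decide (p y)) x = true then acc ++ [f x] else acc := by
    funext acc x; by_cases hx : p x <;> simp [hx]
  rw [h, PySem.List.foldl_append_if]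

lemma filter_pyRange_interval (lo hi : Int) : ∀ (k : Nat) (a b : Int), (b - a).toNat = k →
    (PySem.List.pyRange a b).filter (fun c => decide (lo ≤ c ∧ c ≤ hi))
      = PySem.List.pyRange (max a lo) (min b (hi + 1))
  | 0, a, b, hk => by
    rw [PySem.List.pyRange_one_eq_nil (by omega), PySem.List.pyRange_one_eq_nil (by omega)]
    rfl
  | (k + 1), a, b, hk => by
    rw [PySem.List.pyRange_one_cons (by omega : a < b)]
    by_cases h : lo ≤ a ∧ a ≤ hi
    · rw [List.filter_cons_of_pos (by simpa using h),
        filter_pyRange_interval lo hi k (a + 1) b (by omega),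
        show max (a + 1) lo = a + 1 by omega,
        show max a lo = a by omega,
        PySem.List.pyRange_one_cons (by omega : a < min b (hi + 1))]
    · rw [List.filter_cons_of_neg (by simpa using h),
        filter_pyRange_interval lo hi k (a + 1) b (by omega)]
      rcases (by omega : a < lo ∨ hi < a) with h1 | h1
      · rw [show max (a + 1) lo = max a lo by omega]
      · rw [PySem.List.pyRange_one_eq_nil (by omega), PySem.List.pyRange_one_eq_nil (by omega)]

lemma filter_pyRange_point (o a b : Int) :
    (PySem.List.pyRange a b).filter (fun c => decide (c = o))
      = if a ≤ o ∧ o < b then [o] else [] := by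
  rw [List.filter_congr (fun c _ => by simp only [decide_eq_decide]; omega :
        ∀ c ∈ PySem.List.pyRange a b, decide (c = o) = decide (o ≤ c ∧ c ≤ o)),
    filter_pyRange_interval o o (b - a).toNat a b rfl]
  split_ifs with h
  · rw [show max a o = o by omega, show min b (o + 1) = o + 1 by omega,
      PySem.List.pyRange_one_singleton]
  · rw [PySem.List.pyRange_one_eq_nil (by omega)]

lemma filter_pyRange_two (o d a b : Int) (hod : o < d) :
    (PySem.List.pyRange a b).filter (fun c => decide (c = o ∨ c = d))
      = (if a ≤ o ∧ o < b then [o] else []) ++ (if a ≤ d ∧ d < b then [d] else []) := by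
  by_cases hdb : d < b
  · by_cases hda : a ≤ d
    · rw [PySem.List.pyRange_one_append a d b hda (by omega), List.filter_append]
      rw [List.filter_congr (fun c hc => by
            have := PySem.List.mem_pyRange_one.1 hc
            simp only [decide_eq_decide]; omega :
          ∀ c ∈ PySem.List.pyRange a d, decide (c = o ∨ c = d) = decide (c = o)),
        List.filter_congr (fun c hc => by
            have := PySem.List.mem_pyRange_one.1 hc
            simp only [decide_eq_decide]; omega :
          ∀ c ∈ PySem.List.pyRange d b, decide (c = o ∨ c = d) = decide (c = d)),
        filter_pyRange_point, filter_pyRange_point,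
        show (if a ≤ o ∧ o < d then [o] else ([] : List Int))
            = if a ≤ o ∧ o < b then [o] else [] from by
          split_ifs <;> first | rfl | (exfalso; omega),
        show (if d ≤ d ∧ d < b then [d] else ([] : List Int))
            = if a ≤ d ∧ d < b then [d] else [] from by
          split_ifs <;> first | rfl | (exfalso; omega)]
    · rw [List.filter_eq_nil_iff.mpr (fun c hc => by
          have := PySem.List.mem_pyRange_one.1 hc
          simp only [decide_eq_true_eq]; omega),
        show (if a ≤ o ∧ o < b then [o] else ([] : List Int)) = [] from if_neg (by omega),
        show (if a ≤ d ∧ d < b then [d] else ([] : List Int)) = [] from if_neg (by omega)]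
      rfl
  · rw [List.filter_congr (fun c hc => by
          have := PySem.List.mem_pyRange_one.1 hc
          simp only [decide_eq_decide]; omega :
        ∀ c ∈ PySem.List.pyRange a b, decide (c = o ∨ c = d) = decide (c = o)),
      filter_pyRange_point,
      show (if a ≤ d ∧ d < b then [d] else ([] : List Int)) = [] from if_neg (by omega),
      List.append_nil]

lemma pvOrd_pvLetter (c : Int) (h0 : 0 ≤ c) (h9 : c < 10) : pvOrd (pvLetter c) = 97 + c := by
  interval_cases c <;> decide

lemma colunas_eq (m : Int) : obtem_lista_coluna m
    = (PySem.List.pyRange 0 (min 10 (2 * m))).map pvLetter := by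
  rcases (by omega : 2 * m ≤ 0 ∨ m = 1 ∨ m = 2 ∨ m = 3 ∨ m = 4 ∨ 10 ≤ 2 * m)
    with h | h | h | h | h | h
  · rw [obtem_lista_coluna, foldl_append_ite (fun i => i < m * 2)]
    rw [List.filter_eq_nil_iff.mpr (fun c hc => by
        have := PySem.List.mem_pyRange_one.1 hc
        simp only [decide_eq_true_eq]; omega)]
    rw [PySem.List.pyRange_one_eq_nil (by omega)]
    rfl
  · subst h; decide
  · subst h; decide
  · subst h; decide
  · subst h; decide
  · rw [obtem_lista_coluna, foldl_append_ite (fun i => i < m * 2)]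
    rw [List.filter_eq_self.mpr (fun c hc => by
        have := PySem.List.mem_pyRange_one.1 hc
        rw [show ((pvMaxColunas.length : Nat) : Int) = 10 from by decide] at this
        simp only [decide_eq_true_eq]; omega)]
    rw [show min 10 (2 * m) = 10 by omega]
    decide

lemma row_eq (n orbita linha : Int) (h1 : 1 ≤ linha) (h2 : linha ≤ n) :
    (obtem_lista_coluna (PySem.Int.floordiv n 2)).foldl
        (fun acc cl => if obtem_orbita (cl, linha) n = orbita then acc ++ [(cl, linha)] else acc) []
      = pvRowAlt n orbita (min 10 (2 * PySem.Int.floordiv n 2)) linha := by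
  have hmn : 2 * PySem.Int.floordiv n 2 ≤ n ∧ n ≤ 2 * PySem.Int.floordiv n 2 + 1 := by
    rw [PySem.Int.floordiv_eq_ediv_of_pos (by omega : (0:Int) < 2)]; omega
  rw [colunas_eq, foldl_append_ite (fun cl => obtem_orbita (cl, linha) n = orbita),
    List.filter_map, List.map_map]
  simp only [Function.comp_def]
  set K := min 10 (2 * PySem.Int.floordiv n 2) with hK
  have hKb : K ≤ 10 ∧ K ≤ n := by omega
  rw [List.filter_congr (fun c hc => by
      have hm := PySem.List.mem_pyRange_one.1 hc
      simp only [decide_eq_decide, obtem_orbita, obtem_pos_col, obtem_pos_lin]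
      rw [pvOrd_pvLetter c (by omega) (by omega)]
      constructor <;> (intro hx; omega) :
    ∀ c ∈ PySem.List.pyRange 0 K,
      decide (obtem_orbita (pvLetter c, linha) n = orbita)
        = decide (min (min (linha - 1) (n - linha)) (min c (n - 1 - c)) = orbita))]
  rw [pvRowAlt]
  rcases lt_trichotomy (min (linha - 1) (n - linha)) orbita with hro | hro | hro
  · rw [if_pos hro, List.filter_eq_nil_iff.mpr (fun c hc => by
        have := PySem.List.mem_pyRange_one.1 hc
        simp only [decide_eq_true_eq]; omega)]
    rfl
  · rw [if_neg (by omega), if_pos hro, PySem.List.foldl_append_singleton_eq_map]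
    rw [List.filter_congr (fun c hc => by
        have := PySem.List.mem_pyRange_one.1 hc
        simp only [decide_eq_decide]; omega :
      ∀ c ∈ PySem.List.pyRange 0 K,
        decide (min (min (linha - 1) (n - linha)) (min c (n - 1 - c)) = orbita)
          = decide (orbita ≤ c ∧ c ≤ n - 1 - orbita)),
      filter_pyRange_interval orbita (n - 1 - orbita) (K - 0).toNat 0 K rfl,
      show max (0:Int) orbita = max orbita 0 by omega,
      show min K (n - 1 - orbita + 1) = min (n - 1 - orbita) (K - 1) + 1 by omega]
  · rw [if_neg (by omega), if_neg (by omega),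
      foldl_append_ite (fun c => 0 ≤ c ∧ c < K) (fun c => (pvLetter c, linha))]
    have hod : orbita < n - 1 - orbita := by omega
    rw [List.filter_congr (fun c hc => by
        have := PySem.List.mem_pyRange_one.1 hc
        simp only [decide_eq_decide]; omega :
      ∀ c ∈ PySem.List.pyRange 0 K,
        decide (min (min (linha - 1) (n - linha)) (min c (n - 1 - c)) = orbita)
          = decide (c = orbita ∨ c = n - 1 - orbita)),
      filter_pyRange_two orbita (n - 1 - orbita) 0 K hod]
    by_cases ho : 0 ≤ orbita ∧ orbita < K <;>
      by_cases hd : 0 ≤ n - 1 - orbita ∧ n - 1 - orbita < K <;>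
        simp [List.filter_cons, ho, hd]

-- ===== VERDICT (by name: the statement is the Claim_ definition above) =====
theorem obtem_posicoes_por_orbita_spec : Claim_equal_obtem_posicoes_por_orbita := by
  intro n orbita _
  unfold Spec_obtem_posicoes_por_orbita obtem_posicoes_por_orbita obtem_posicoes_por_orbita_alt
  refine PySem.List.foldl_congr_mem _ _ _ _ (fun acc linha hlin => ?_)
  have hb := PySem.List.mem_pyRange_one.1 hlin
  rw [foldl_append_ite (fun cl => obtem_orbita (cl, linha) n = orbita)]
  rw [← row_eq n orbita linha (by omega) (by omega),
    foldl_append_ite (fun cl => obtem_orbita (cl, linha) n = orbita)]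
  simp
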